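-- pv_equiv track=rewrite | github.com/krawsssyy/writeups | UNI-CTF-HTB-2023/WindowOfOpportunity + bioBundle.py | bruteforce_password
-- ===== SOURCE A (Python) =====
-- arr = [0x9c, 0x96, 0xbd, 0xaf, 0x93, 0xc3, 0x94, 0x60, 0xa2, 0xd1, 0xc2, 0xcf, 0x9c, 0xa3, 0xa6, 0x68, 0x94, 0xc1, 0xd7, 0xac, 0x96, 0x93, 0x93, 0xd6, 0xa8, 0x9f, 0xd2, 0x94, 0xa7, 0xd6, 0x8f, 0xa0, 0xa3, 0xa1, 0xa3, 0x56, 0x9e]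
--
-- def check_password(password):
--     for i in range(len(password) - 1):
--         char_sum = ord(password[i]) + ord(password[i + 1])
--         if char_sum != arr[i]:
--             return False
--     return True
--
-- def bruteforce_password(start):
--     password = start
--     for _ in range(36):
--         for i in range(32, 127):
--             aux_pwd = password + chr(i)
--             if len(aux_pwd) < 39:
--                 if check_password(aux_pwd):
--                     password += chr(i)
--     return password
-- ===== SOURCE B (Python) =====
-- arr = [0x9c, 0x96, 0xbd, 0xaf, 0x93, 0xc3, 0x94, 0x60, 0xa2, 0xd1, 0xc2, 0xcf, 0x9c, 0xa3, 0xa6, 0x68, 0x94, 0xc1, 0xd7, 0xac, 0x96, 0x93, 0x93, 0xd6, 0xa8, 0x9f, 0xd2, 0x94, 0xa7, 0xd6, 0x8f, 0xa0, 0xa3, 0xa1, 0xa3, 0x56, 0x9e]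
--
-- def bruteforce_password(start):
--     # Direct solve: each next char is forced by the pair-sum constraints,
--     # so extend greedily instead of 36 brute-force sweeps over all candidates.
--     password = start
--     if len(password) < 39 and all(
--         ord(x) + ord(y) == v for (x, y), v in zip(zip(password, password[1:]), arr)
--     ):
--         while len(password) < 38:
--             c = 32 if not password else arr[len(password) - 1] - ord(password[-1])
--             if 32 <= c <= 126:
--                 password += chr(c)
--             else:
--                 break
--     return password
-- ===== Notes on version B (the rewrite author's own statement) =====
-- stated objective: faster
-- what changed: Replaces the 36 brute-force sweeps over all 95 candidate characters (each candidate re-validated by an O(n) full-password scan) with one O(n) validity check of the start followed by directly solving each forced next character as arr[len-1] - ord(last), appending while it stays printable.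
import Mathlib
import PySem

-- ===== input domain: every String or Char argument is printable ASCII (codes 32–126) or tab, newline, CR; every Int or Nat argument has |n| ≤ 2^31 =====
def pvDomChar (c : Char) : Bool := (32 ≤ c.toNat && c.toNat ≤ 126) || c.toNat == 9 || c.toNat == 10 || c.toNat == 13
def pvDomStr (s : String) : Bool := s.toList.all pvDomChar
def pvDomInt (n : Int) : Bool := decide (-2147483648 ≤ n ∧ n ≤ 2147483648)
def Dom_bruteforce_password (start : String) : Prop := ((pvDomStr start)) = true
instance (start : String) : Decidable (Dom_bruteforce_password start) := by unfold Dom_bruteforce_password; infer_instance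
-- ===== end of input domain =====

-- B replaces A's 36 brute-force sweeps over the 95 candidate characters (each candidate
-- re-validated by a scan of the whole password) with one validity check of the start plus
-- directly solving each forced next character; both ports work on String.toList.

-- ===== PORT A =====

-- arr (module-level constant)
def pvArr : List Int := [156, 150, 189, 175, 147, 195, 148, 96, 162, 209, 194, 207, 156, 163, 166, 104, 148, 193, 215, 172, 150, 147, 147, 214, 168, 159, 210, 148, 167, 214, 143, 160, 163, 161, 163, 86, 158]

-- the loop of check_password: for i in range(len(password)-1): if ord(p[i])+ord(p[i+1]) != arr[i]: return False
-- (the `none` fallback marks where Python would raise IndexError; unreachable from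
--  bruteforce_password, which only calls check_password on passwords of length ≤ 38)
def pvChkLoop (password : List Char) : List Int → Bool
  | [] => true
  | i :: rest =>
    match PySem.List.pyGet? password i, PySem.List.pyGet? password (i + 1), PySem.List.pyGet? pvArr i with
    | some a, some b, some v =>
      if (a.toNat : Int) + (b.toNat : Int) ≠ v then false else pvChkLoop password rest
    | _, _, _ => false

def check_password (password : List Char) : Bool :=
  pvChkLoop password (PySem.List.pyRange 0 ((password.length : Int) - 1) 1)

-- body of `for i in range(32, 127)`: aux_pwd = password + chr(i); if len(aux_pwd) < 39: if check_password(aux_pwd): password += chr(i)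
def pvInnerBody (password : List Char) (i : Int) : List Char :=
  let aux := password ++ [Char.ofNat i.toNat]   -- chr(i); exact for 0 ≤ i < 0x110000, here 32 ≤ i ≤ 126
  if ((aux.length : Int) < 39) then (if check_password aux then aux else password) else password

-- one iteration of `for _ in range(36)`, i.e. the whole `for i in range(32, 127)` loop
def pvPass (password : List Char) : List Char :=
  (PySem.List.pyRange 32 127 1).foldl pvInnerBody password

def bruteforce_password (start : String) : String :=
  String.ofList ((PySem.List.pyRange 0 36 1).foldl (fun password _ => pvPass password) start.toList)

-- ===== PORT B =====

-- all(ord(x) + ord(y) == v for (x, y), v in zip(zip(password, password[1:]), arr))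
def pvGoodB : List Char → List Int → Bool
  | x :: y :: t, v :: vs => ((x.toNat : Int) + (y.toNat : Int) == v) && pvGoodB (y :: t) vs
  | _, _ => true

-- while len(password) < 38: c = 32 if not password else arr[len(password)-1] - ord(password[-1]); ...
-- (arr[len-1] as List.getD and password[-1] as getLastD: exact, since 1 ≤ len ≤ 37 in that branch)
def pvGrow (password : List Char) : List Char :=
  if password.length < 38 then
    let c : Int := if password = [] then 32
                   else pvArr.getD (password.length - 1) 0 - ((password.getLastD 'A').toNat : Int)
    if 32 ≤ c ∧ c ≤ 126 then pvGrow (password ++ [Char.ofNat c.toNat]) else password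
  else password
termination_by 38 - password.length
decreasing_by simp; omega

def bruteforce_password_alt (start : String) : String :=
  let password := start.toList
  if ((password.length : Int) < 39) ∧ pvGoodB password pvArr then String.ofList (pvGrow password)
  else start

-- ===== PRECONDITION & SPEC =====
def Spec_bruteforce_password (start : String) (out : String) : Prop := out = bruteforce_password_alt start
instance (start : String) (out : String) : Decidable (Spec_bruteforce_password start out) := by unfold Spec_bruteforce_password; infer_instance

-- ===== CLAIM (what is proved, stated in full; the proofs are below) =====
def Claim_equal_bruteforce_password : Prop := ∀ (start : String), Dom_bruteforce_password start → Spec_bruteforce_password start (bruteforce_password start)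

-- ===== LEMMAS AND PROOFS =====

-- ord of the last character (0 for the empty password): the abstraction of the loop state
def ordLast (p : List Char) : Int :=
  match p.getLast? with
  | some ch => (ch.toNat : Int)
  | none => 0

-- character codes appended by one inner sweep starting at candidate j, given last code c, length L
-- (fuel-structural so that `decide` can evaluate it; fuel ≥ 127 - j is enough)
def pvRun : Nat → Nat → Int → Nat → List Int
  | 0, _, _, _ => []
  | f + 1, j, c, L =>
    if L < 38 ∧ j ≤ 126 then
      if L = 0 then (j : Int) :: pvRun f (j + 1) (j : Int) 1
      else
        let v : Int := pvArr.getD (L - 1) 0 - c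
        if (j : Int) ≤ v ∧ v ≤ 126 then v :: pvRun f (v.toNat + 1) v (L + 1) else []
    else []

-- character codes appended by n outer sweeps
def pvOuter : Nat → Int → Nat → List Int
  | 0, _, _ => []
  | n + 1, c, L =>
    let r := pvRun 95 32 c L
    r ++ pvOuter n (r.getLastD c) (L + r.length)

-- character codes appended by B's while loop (fuel-structural; fuel ≥ 38 - L is enough)
def pvGreedy : Nat → Int → Nat → List Int
  | 0, _, _ => []
  | f + 1, c, L =>
    if L < 38 then
      let v : Int := if L = 0 then 32 else pvArr.getD (L - 1) 0 - c
      if 32 ≤ v ∧ v ≤ 126 then v :: pvGreedy f v (L + 1) else []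
    else []

def pvToChars (r : List Int) : List Char := r.map (fun v => Char.ofNat v.toNat)

-- small facts about pvGoodB (equation lemmas of the two-list match)
theorem pvGoodB_nil (vs : List Int) : pvGoodB [] vs = true := rfl
theorem pvGoodB_single (x : Char) (vs : List Int) : pvGoodB [x] vs = true := rfl
theorem pvGoodB_cons_cons (x y : Char) (t : List Char) (v : Int) (vs : List Int) :
    pvGoodB (x :: y :: t) (v :: vs) = (((x.toNat : Int) + (y.toNat : Int) == v) && pvGoodB (y :: t) vs) := rfl

theorem pvArr_length : pvArr.length = 37 := by decide

theorem pvRun_zero (j : Nat) (c : Int) (L : Nat) : pvRun 0 j c L = [] := rfl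
theorem pvRun_succ (f j : Nat) (c : Int) (L : Nat) :
    pvRun (f + 1) j c L =
      if L < 38 ∧ j ≤ 126 then
        if L = 0 then (j : Int) :: pvRun f (j + 1) (j : Int) 1
        else
          let v : Int := pvArr.getD (L - 1) 0 - c
          if (j : Int) ≤ v ∧ v ≤ 126 then v :: pvRun f (v.toNat + 1) v (L + 1) else []
      else [] := rfl

theorem pvChkLoop_cons_some (p : List Char) (i : Int) (rest : List Int) (a b : Char) (v : Int)
    (h1 : PySem.List.pyGet? p i = some a) (h2 : PySem.List.pyGet? p (i + 1) = some b)
    (h3 : PySem.List.pyGet? pvArr i = some v) :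
    pvChkLoop p (i :: rest)
      = if (a.toNat : Int) + (b.toNat : Int) ≠ v then false else pvChkLoop p rest := by
  simp [pvChkLoop, h1, h2, h3]

theorem char_toNat_ofNat {j : Nat} (h : j ≤ 126) : (Char.ofNat j).toNat = j := by
  have hv : Nat.isValidChar j := Or.inl (by omega)
  simp [Char.toNat_ofNat, hv]

theorem ordLast_append_single (p : List Char) (ch : Char) : ordLast (p ++ [ch]) = (ch.toNat : Int) := by
  simp [ordLast]

theorem ordLast_ne_nil (p : List Char) (h : p ≠ []) : ordLast p = ((p.getLastD 'A').toNat : Int) := by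
  rcases List.eq_nil_or_concat p with rfl | ⟨q, ch, rfl⟩
  · exact absurd rfl h
  · simp [ordLast]

theorem ordLast_cons_cons (x y : Char) (t : List Char) : ordLast (x :: y :: t) = ordLast (y :: t) := by
  simp [ordLast, List.getLast?_cons_cons]

-- the length-(≤ 1) tails are always good
theorem pvGoodB_short (l : List Char) (vs : List Int) (h : l.length ≤ 1) : pvGoodB l vs = true := by
  match l with
  | [] => rfl
  | [x] => rfl
  | x :: y :: t => simp at h

-- A's check loop is B's zip-check (for passwords of length ≤ 38)
theorem drop_two (p : List Char) (k : Nat) (h : k + 1 < p.length) :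
    ∃ a b t, p.drop k = a :: b :: t := by
  have h2 : 2 ≤ (p.drop k).length := by simp; omega
  cases hd : p.drop k with
  | nil => rw [hd] at h2; simp at h2
  | cons a t1 =>
    cases t1 with
    | nil => rw [hd] at h2; simp at h2
    | cons b t => exact ⟨a, b, t, rfl⟩

theorem chk_aux (m : Nat) : ∀ (p : List Char) (k : Nat), p.length ≤ 38 → p.length ≤ k + m + 1 → k ≤ p.length →
    pvChkLoop p (PySem.List.pyRange (k : Int) ((p.length : Int) - 1) 1) = pvGoodB (p.drop k) (pvArr.drop k) := by
  induction m with
  | zero =>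
    intro p k hp hm hk
    rw [PySem.List.pyRange_one_eq_nil (by push_cast; omega)]
    rw [pvGoodB_short _ _ (by simp; omega)]
    rfl
  | succ m ih =>
    intro p k hp hm hk
    by_cases hklt : k + 1 < p.length
    · rw [PySem.List.pyRange_one_cons (by push_cast; omega)]
      obtain ⟨a, b, t, hd⟩ := drop_two p k hklt
      have hk37 : k < pvArr.length := by rw [pvArr_length]; omega
      obtain ⟨v, vs, hdA⟩ : ∃ v vs, pvArr.drop k = v :: vs := by
        cases hdA : pvArr.drop k with
        | nil =>
          have : (pvArr.drop k).length = 0 := by rw [hdA]; rfl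
          rw [List.length_drop] at this
          omega
        | cons v vs => exact ⟨v, vs, rfl⟩
      have hg1 : PySem.List.pyGet? p (k : Int) = some a := by
        rw [PySem.List.pyGet?_natCast]
        have : p[k]? = (p.drop k)[0]? := by
          rw [List.getElem?_drop]; simp
        rw [this, hd]
        rfl
      have hg2 : PySem.List.pyGet? p ((k : Int) + 1) = some b := by
        have hcast : ((k : Int) + 1) = ((k + 1 : Nat) : Int) := by push_cast; ring
        rw [hcast, PySem.List.pyGet?_natCast]
        have : p[k + 1]? = (p.drop k)[1]? := by
          rw [List.getElem?_drop]
        rw [this, hd]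
        rfl
      have hg3 : PySem.List.pyGet? pvArr (k : Int) = some v := by
        rw [PySem.List.pyGet?_natCast]
        have : pvArr[k]? = (pvArr.drop k)[0]? := by
          rw [List.getElem?_drop]; simp
        rw [this, hdA]
        rfl
      have htail : p.drop (k + 1) = b :: t := by
        have : p.drop (k + 1) = (p.drop k).drop 1 := by
          rw [List.drop_drop]
        rw [this, hd]
        rfl
      have htailA : pvArr.drop (k + 1) = vs := by
        have : pvArr.drop (k + 1) = (pvArr.drop k).drop 1 := by
          rw [List.drop_drop]
        rw [this, hdA]
        rfl
      rw [pvChkLoop_cons_some p (k : Int) _ a b v hg1 hg2 hg3]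
      rw [hd, hdA, pvGoodB_cons_cons]
      have hrest : pvChkLoop p (PySem.List.pyRange ((k : Int) + 1) ((p.length : Int) - 1) 1)
          = pvGoodB (b :: t) vs := by
        have hcast : ((k : Int) + 1) = ((k + 1 : Nat) : Int) := by push_cast; ring
        rw [hcast, ih p (k + 1) hp (by omega) (by omega), htail, htailA]
      by_cases hsum : (a.toNat : Int) + (b.toNat : Int) = v
      · rw [if_neg (by omega)]
        rw [hrest]
        have : ((a.toNat : Int) + (b.toNat : Int) == v) = true := by
          simp [hsum]
        rw [this, Bool.true_and]
      · rw [if_pos hsum]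
        have : ((a.toNat : Int) + (b.toNat : Int) == v) = false := by
          simp [hsum]
        rw [this, Bool.false_and]
    · rw [PySem.List.pyRange_one_eq_nil (by push_cast; omega)]
      rw [pvGoodB_short _ _ (by simp; omega)]
      rfl

theorem check_eq (p : List Char) (hp : p.length ≤ 38) : check_password p = pvGoodB p pvArr := by
  have := chk_aux p.length p 0 hp (by omega) (by omega)
  simpa [check_password] using this

-- appending one character to the password
theorem good_append (p : List Char) (ch : Char) : ∀ vs : List Int, p.length ≤ vs.length →
    ((pvGoodB (p ++ [ch]) vs = true) ↔
      (pvGoodB p vs = true ∧ (p = [] ∨ ordLast p + (ch.toNat : Int) = vs.getD (p.length - 1) 0))) := by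
  induction p with
  | nil => intro vs h; simp [pvGoodB_single, pvGoodB_nil]
  | cons x q ih =>
    intro vs h
    match q, vs with
    | [], v :: vs' =>
      have hL : ordLast [x] = (x.toNat : Int) := by simp [ordLast]
      have hshape : (x :: ([] : List Char)) ++ [ch] = x :: ch :: [] := rfl
      constructor
      · intro hb
        rw [hshape, pvGoodB_cons_cons, Bool.and_eq_true] at hb
        refine ⟨pvGoodB_single x (v :: vs'), Or.inr ?_⟩
        have he : (x.toNat : Int) + (ch.toNat : Int) = v := by
          have := hb.1
          simpa using this
        simpa [hL] using he
      · rintro ⟨-, h2 | h2⟩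
        · exact absurd h2 (by simp)
        · rw [hshape, pvGoodB_cons_cons, Bool.and_eq_true]
          refine ⟨?_, pvGoodB_single ch vs'⟩
          have he : (x.toNat : Int) + (ch.toNat : Int) = v := by
            simpa [hL] using h2
          simp [he]
    | y :: t, v :: vs' =>
      have hlen : (y :: t).length ≤ vs'.length := by simp at h ⊢; omega
      have hiff := ih vs' hlen
      rw [List.cons_append] at hiff
      have hshape : (x :: y :: t) ++ [ch] = x :: y :: (t ++ [ch]) := by simp
      rw [hshape, pvGoodB_cons_cons]
      constructor
      · intro hb
        rw [Bool.and_eq_true] at hb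
        obtain ⟨h1, h2⟩ := hb
        rw [hiff] at h2
        refine ⟨?_, ?_⟩
        · rw [pvGoodB_cons_cons, Bool.and_eq_true]
          exact ⟨h1, h2.1⟩
        · rcases h2.2 with h2 | h2
          · exact absurd h2 (by simp)
          · right
            rw [ordLast_cons_cons]
            simpa [List.getD] using h2
      · rintro ⟨h1, h2⟩
        rw [pvGoodB_cons_cons, Bool.and_eq_true] at h1
        rw [Bool.and_eq_true]
        refine ⟨h1.1, ?_⟩
        rw [hiff]
        refine ⟨h1.2, ?_⟩
        rcases h2 with h2 | h2
        · exact absurd h2 (by simp)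
        · right
          rw [ordLast_cons_cons] at h2
          simpa [List.getD] using h2

-- pvRun does not depend on the fuel, as long as there is enough of it
theorem run_fuel (f1 : Nat) : ∀ (f2 j : Nat) (c : Int) (L : Nat), 127 ≤ j + f1 → 127 ≤ j + f2 →
    pvRun f1 j c L = pvRun f2 j c L := by
  induction f1 with
  | zero =>
    intro f2 j c L h1 h2
    match f2 with
    | 0 => rfl
    | f2 + 1 => rw [pvRun_succ, if_neg (by omega)]; rfl
  | succ f1 ih =>
    intro f2 j c L h1 h2
    match f2 with
    | 0 => rw [pvRun_succ, if_neg (by omega)]; rfl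
    | f2 + 1 =>
      rw [pvRun_succ, pvRun_succ]
      by_cases hc : L < 38 ∧ j ≤ 126
      · rw [if_pos hc, if_pos hc]
        by_cases hL : L = 0
        · rw [if_pos hL, if_pos hL, ih f2 (j + 1) _ _ (by omega) (by omega)]
        · rw [if_neg hL, if_neg hL]
          set v : Int := pvArr.getD (L - 1) 0 - c with hv
          by_cases hjv : (j : Int) ≤ v ∧ v ≤ 126
          · rw [if_pos hjv, if_pos hjv]
            have hvj : j ≤ v.toNat := by omega
            rw [ih f2 (v.toNat + 1) _ _ (by omega) (by omega)]
          · rw [if_neg hjv, if_neg hjv]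
      · rw [if_neg hc, if_neg hc]

theorem run_long (f j : Nat) (c : Int) (L : Nat) (h : 38 ≤ L) : pvRun f j c L = [] := by
  cases f <;> simp [pvRun, show ¬(L < 38) by omega]

-- everything pvRun emits is a printable code
theorem run_bounds (f : Nat) : ∀ (j : Nat) (c : Int) (L : Nat), 32 ≤ j →
    ∀ x ∈ pvRun f j c L, 32 ≤ x ∧ x ≤ 126 := by
  induction f with
  | zero => intro j c L hj x hx; simp [pvRun] at hx
  | succ f ih =>
    intro j c L hj x hx
    rw [pvRun] at hx
    by_cases hc : L < 38 ∧ j ≤ 126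
    · rw [if_pos hc] at hx
      by_cases hL : L = 0
      · rw [if_pos hL] at hx
        rcases List.mem_cons.1 hx with rfl | hx
        · constructor <;> [exact_mod_cast Nat.cast_le.2 hj; exact_mod_cast Nat.cast_le.2 hc.2]
        · exact ih (j + 1) _ _ (by omega) x hx
      · rw [if_neg hL] at hx
        by_cases hjv : (j : Int) ≤ pvArr.getD (L - 1) 0 - c ∧ pvArr.getD (L - 1) 0 - c ≤ 126
        · rw [if_pos hjv] at hx
          rcases List.mem_cons.1 hx with rfl | hx
          · constructor
            · have : (32 : Int) ≤ j := by exact_mod_cast hj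
              omega
            · exact hjv.2
          · exact ih _ _ _ (by omega) x hx
        · rw [if_neg hjv] at hx; simp at hx
    · rw [if_neg hc] at hx; simp at hx

-- the character written back from a code in [32, 126]
theorem ordLast_append_code (p : List Char) (v : Int) (h1 : 32 ≤ v) (h2 : v ≤ 126) :
    ordLast (p ++ [Char.ofNat v.toNat]) = v := by
  rw [ordLast_append_single, char_toNat_ofNat (by omega)]
  omega

theorem pvToChars_nil : pvToChars [] = [] := rfl
theorem pvToChars_cons (v : Int) (r : List Int) :
    pvToChars (v :: r) = Char.ofNat v.toNat :: pvToChars r := rfl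
theorem pvToChars_append (a b : List Int) : pvToChars (a ++ b) = pvToChars a ++ pvToChars b := by
  simp [pvToChars]

theorem ordLast_append_toChars (p : List Char) (r : List Int) (hb : ∀ x ∈ r, 32 ≤ x ∧ x ≤ 126) :
    ordLast (p ++ pvToChars r) = r.getLastD (ordLast p) := by
  induction r generalizing p with
  | nil => simp [pvToChars_nil, ordLast]
  | cons v r ih =>
    have hv := hb v (by simp)
    rw [pvToChars_cons]
    have hsplit : p ++ Char.ofNat v.toNat :: pvToChars r = (p ++ [Char.ofNat v.toNat]) ++ pvToChars r := by
      simp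
    rw [hsplit, ih _ (fun x hx => hb x (by simp [hx]))]
    rw [ordLast_append_code p v hv.1 hv.2, List.getLastD_cons]

-- ===== the inner sweep =====

theorem pvRun_succ_stop (f j : Nat) (c : Int) (L : Nat) (h : ¬(L < 38 ∧ j ≤ 126)) :
    pvRun (f + 1) j c L = [] := by
  simp only [pvRun_succ]
  rw [if_neg h]

theorem pvRun_succ_zero (f j : Nat) (c : Int) (h : j ≤ 126) :
    pvRun (f + 1) j c 0 = (j : Int) :: pvRun f (j + 1) (j : Int) 1 := by
  simp [pvRun_succ, h]

theorem pvRun_succ_app (f j : Nat) (c : Int) (L : Nat) (h1 : L < 38) (hj : j ≤ 126) (h0 : L ≠ 0)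
    (h2 : (j : Int) ≤ pvArr.getD (L - 1) 0 - c) (h3 : pvArr.getD (L - 1) 0 - c ≤ 126) :
    pvRun (f + 1) j c L = (pvArr.getD (L - 1) 0 - c)
        :: pvRun f ((pvArr.getD (L - 1) 0 - c).toNat + 1) (pvArr.getD (L - 1) 0 - c) (L + 1) := by
  simp only [pvRun_succ]
  rw [if_pos ⟨h1, hj⟩, if_neg h0, if_pos ⟨h2, h3⟩]

theorem pvRun_succ_end (f j : Nat) (c : Int) (L : Nat) (h1 : L < 38) (hj : j ≤ 126) (h0 : L ≠ 0)
    (h2 : ¬((j : Int) ≤ pvArr.getD (L - 1) 0 - c ∧ pvArr.getD (L - 1) 0 - c ≤ 126)) :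
    pvRun (f + 1) j c L = [] := by
  simp only [pvRun_succ]
  rw [if_pos ⟨h1, hj⟩, if_neg h0, if_neg h2]

theorem pass_aux (f : Nat) : ∀ (j : Nat), 32 ≤ j → 127 ≤ j + f →
    ∀ p : List Char, pvGoodB p pvArr = true →
      ((PySem.List.pyRange (j : Int) 127 1).foldl pvInnerBody p
          = p ++ pvToChars (pvRun f j (ordLast p) p.length)) ∧
      pvGoodB (p ++ pvToChars (pvRun f j (ordLast p) p.length)) pvArr = true := by
  induction f with
  | zero =>
    intro j hj32 hjf p hg
    rw [PySem.List.pyRange_one_eq_nil (by push_cast; omega)]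
    rw [pvRun_zero]
    simpa [pvToChars_nil] using hg
  | succ f ih =>
    intro j hj32 hjf p hg
    by_cases hj : j ≤ 126
    case neg =>
      rw [PySem.List.pyRange_one_eq_nil (by push_cast; omega)]
      rw [pvRun_succ_stop _ _ _ _ (by omega)]
      simpa [pvToChars_nil] using hg
    case pos =>
    rw [PySem.List.pyRange_one_cons (by push_cast; omega)]
    rw [List.foldl_cons]
    have hcast : ((j : Int) + 1) = ((j + 1 : Nat) : Int) := by push_cast; ring
    by_cases hlen : p.length < 38
    case neg =>
      -- password already full: the body never fires
      have hbody : pvInnerBody p (j : Int) = p := by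
        rw [pvInnerBody]
        simp only [List.length_append, List.length_cons, List.length_nil]
        rw [if_neg (by push_cast; omega)]
      rw [hbody, hcast]
      have := ih (j + 1) (by omega) (by omega) p hg
      rw [pvRun_succ_stop _ _ _ _ (by omega)]
      rw [run_long f (j + 1) _ _ (by omega)] at this
      simpa [pvToChars_nil] using this
    case pos =>
    by_cases hnil : p = []
    · subst hnil
      have hchk : check_password [Char.ofNat j] = true := by
        rw [check_eq _ (by simp)]
        exact pvGoodB_single _ _
      have hbody : pvInnerBody [] (j : Int) = [Char.ofNat j] := by
        rw [pvInnerBody]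
        simp [hchk]
      rw [hbody, hcast]
      have hgood1 : pvGoodB [Char.ofNat j] pvArr = true := pvGoodB_single _ _
      have hthis := ih (j + 1) (by omega) (by omega) [Char.ofNat j] hgood1
      have hol : ordLast [Char.ofNat j] = (j : Int) := by
        have := char_toNat_ofNat (j := j) hj
        simp [ordLast, this]
      rw [hol] at hthis
      have hlen1 : ([Char.ofNat j] : List Char).length = 1 := rfl
      rw [hlen1] at hthis
      have hruneq : pvRun (f + 1) j (ordLast ([] : List Char)) ([] : List Char).length
          = (j : Int) :: pvRun f (j + 1) (j : Int) 1 := pvRun_succ_zero f j _ hj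
      rw [hruneq, pvToChars_cons, List.nil_append]
      have hjc : Char.ofNat ((j : Int)).toNat = Char.ofNat j := by norm_num
      rw [hjc]
      have hsingle : Char.ofNat j :: pvToChars (pvRun f (j + 1) ((j : Nat) : Int) 1)
          = [Char.ofNat j] ++ pvToChars (pvRun f (j + 1) ((j : Nat) : Int) 1) := rfl
      rw [hsingle]
      exact hthis
    · -- nonempty, not full
      have hL1 : 1 ≤ p.length := by
        cases p with
        | nil => exact absurd rfl hnil
        | cons a t => simp
      have hch : ((Char.ofNat ((j : Int)).toNat).toNat : Int) = (j : Int) := by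
        rw [show ((j : Int)).toNat = j by simp, char_toNat_ofNat hj]
      have hchk : check_password (p ++ [Char.ofNat ((j : Int)).toNat]) = true ↔
          (j : Int) = pvArr.getD (p.length - 1) 0 - ordLast p := by
        rw [check_eq _ (by simp; omega)]
        rw [good_append p _ pvArr (by rw [pvArr_length]; omega)]
        constructor
        · rintro ⟨-, h | h⟩
          · exact absurd h hnil
          · rw [hch] at h
            omega
        · intro h
          refine ⟨hg, Or.inr ?_⟩
          rw [hch]
          omega
      by_cases hjv : (j : Int) = pvArr.getD (p.length - 1) 0 - ordLast p
      · -- the forced character is exactly candidate j: append it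
        have hbody : pvInnerBody p (j : Int) = p ++ [Char.ofNat ((j : Int)).toNat] := by
          rw [pvInnerBody]
          simp only [List.length_append, List.length_cons, List.length_nil]
          rw [if_pos (by push_cast; omega), if_pos (hchk.2 hjv)]
        have hgood1 : pvGoodB (p ++ [Char.ofNat ((j : Int)).toNat]) pvArr = true := by
          rw [good_append p _ pvArr (by rw [pvArr_length]; omega)]
          refine ⟨hg, Or.inr ?_⟩
          rw [hch]
          omega
        rw [hbody, hcast]
        have hthis := ih (j + 1) (by omega) (by omega) _ hgood1
        have hol : ordLast (p ++ [Char.ofNat ((j : Int)).toNat])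
            = pvArr.getD (p.length - 1) 0 - ordLast p := by
          rw [← hjv]
          rw [show ((j : Int)).toNat = j by simp]
          exact ordLast_append_code p _ (by exact_mod_cast Nat.cast_le.2 hj32) (by exact_mod_cast Nat.cast_le.2 hj)
        rw [hol] at hthis
        have hlen1 : (p ++ [Char.ofNat ((j : Int)).toNat]).length = p.length + 1 := by simp
        rw [hlen1] at hthis
        have hruneq := pvRun_succ_app f j (ordLast p) p.length hlen hj (by omega) (le_of_eq hjv) (by omega)
        rw [hruneq]
        have htn : (pvArr.getD (p.length - 1) 0 - ordLast p).toNat + 1 = j + 1 := by omega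
        rw [htn, pvToChars_cons]
        have hvchar : Char.ofNat (pvArr.getD (p.length - 1) 0 - ordLast p).toNat
            = Char.ofNat ((j : Int)).toNat := by
          rw [← hjv]
        rw [hvchar]
        constructor
        · rw [hthis.1, ← hjv]
          simp
        · rw [← hjv]
          have heq : p ++ Char.ofNat ((j : Int)).toNat :: pvToChars (pvRun f (j + 1) (↑j) (p.length + 1))
              = (p ++ [Char.ofNat ((j : Int)).toNat]) ++ pvToChars (pvRun f (j + 1) (↑j) (p.length + 1)) := by
            simp
          rw [heq]
          have h2 := hthis.2
          rw [← hjv] at h2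
          exact h2
      · -- candidate j is not the forced character: nothing happens at j
        have hbody : pvInnerBody p (j : Int) = p := by
          rw [pvInnerBody]
          simp only [List.length_append, List.length_cons, List.length_nil]
          rw [if_pos (by push_cast; omega)]
          rw [if_neg (by rw [hchk]; exact hjv)]
        rw [hbody, hcast]
        have hthis := ih (j + 1) (by omega) (by omega) p hg
        have hrw : pvRun (f + 1) j (ordLast p) p.length = pvRun f (j + 1) (ordLast p) p.length := by
          by_cases hle : (j : Int) ≤ pvArr.getD (p.length - 1) 0 - ordLast p ∧
              pvArr.getD (p.length - 1) 0 - ordLast p ≤ 126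
          · have hj126 : j ≤ 125 := by omega
            obtain ⟨f', rfl⟩ : ∃ f', f = f' + 1 := ⟨f - 1, by omega⟩
            rw [pvRun_succ_app (f' + 1) j (ordLast p) p.length hlen hj (by omega) hle.1 hle.2]
            rw [pvRun_succ_app f' (j + 1) (ordLast p) p.length hlen (by omega) (by omega)
                  (by push_cast; omega) hle.2]
            rw [run_fuel (f' + 1) f' ((pvArr.getD (p.length - 1) 0 - ordLast p).toNat + 1) _ _
                  (by omega) (by omega)]
          · rw [pvRun_succ_end f j (ordLast p) p.length hlen hj (by omega) hle]
            rcases f with _ | f'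
            · rw [pvRun_zero]
            · by_cases hj1 : j + 1 ≤ 126
              · rw [pvRun_succ_end f' (j + 1) (ordLast p) p.length hlen hj1 (by omega)
                      (by push_cast; push_cast at hle; omega)]
              · rw [pvRun_succ_stop _ _ _ _ (by omega)]
        rw [hrw]
        exact hthis

theorem pass_eq (p : List Char) (hg : pvGoodB p pvArr = true) :
    pvPass p = p ++ pvToChars (pvRun 95 32 (ordLast p) p.length) ∧
    pvGoodB (p ++ pvToChars (pvRun 95 32 (ordLast p) p.length)) pvArr = true := by
  have := pass_aux 95 32 (by omega) (by omega) p hg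
  simpa [pvPass] using this

-- ===== the outer loop =====

theorem foldl_const_iterate {α β : Type} (g : α → α) (l : List β) (p : α) :
    l.foldl (fun s _ => g s) p = g^[l.length] p := by
  induction l generalizing p with
  | nil => rfl
  | cons x t ih => simp [List.foldl_cons, ih, Function.iterate_succ_apply]

theorem iter_eq (n : Nat) : ∀ p : List Char, pvGoodB p pvArr = true →
    pvPass^[n] p = p ++ pvToChars (pvOuter n (ordLast p) p.length) ∧
    pvGoodB (p ++ pvToChars (pvOuter n (ordLast p) p.length)) pvArr = true := by
  induction n with
  | zero => intro p hg; simpa [pvOuter, pvToChars_nil] using hg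
  | succ n ih =>
    intro p hg
    rw [Function.iterate_succ_apply]
    obtain ⟨hp1, hp2⟩ := pass_eq p hg
    rw [hp1]
    obtain ⟨hq1, hq2⟩ := ih _ hp2
    set r := pvRun 95 32 (ordLast p) p.length with hr
    have hbnds := run_bounds 95 32 (ordLast p) p.length (by omega)
    have hol : ordLast (p ++ pvToChars r) = r.getLastD (ordLast p) :=
      ordLast_append_toChars p r (by intro x hx; exact hbnds x hx)
    have hlen : (p ++ pvToChars r).length = p.length + r.length := by simp [pvToChars]
    rw [hol, hlen] at hq1 hq2
    have hout : pvOuter (n + 1) (ordLast p) p.length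
        = r ++ pvOuter n (r.getLastD (ordLast p)) (p.length + r.length) := by
      rw [pvOuter, ← hr]
    constructor
    · rw [hq1, hout, pvToChars_append, ← List.append_assoc]
    · rw [hout, pvToChars_append, ← List.append_assoc]
      exact hq2

-- ===== B's loop =====

theorem grow_aux (f : Nat) : ∀ p : List Char, 38 ≤ p.length + f →
    pvGrow p = p ++ pvToChars (pvGreedy f (ordLast p) p.length) := by
  induction f with
  | zero =>
    intro p hf
    rw [pvGrow, if_neg (by omega)]
    simp [pvGreedy, pvToChars]
  | succ f ih =>
    intro p hf
    by_cases hlen : p.length < 38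
    case neg =>
      rw [pvGrow, if_neg hlen, pvGreedy, if_neg hlen]
      simp [pvToChars]
    case pos =>
    rw [pvGrow, if_pos hlen, pvGreedy, if_pos hlen]
    have hcond : (if p = [] then (32 : Int)
          else pvArr.getD (p.length - 1) 0 - ((p.getLastD 'A').toNat : Int))
        = (if p.length = 0 then (32 : Int) else pvArr.getD (p.length - 1) 0 - ordLast p) := by
      by_cases hnil : p = []
      · subst hnil; simp
      · rw [if_neg hnil, if_neg (by simpa [List.length_eq_zero_iff] using hnil)]
        rw [ordLast_ne_nil p hnil]
    rw [hcond]
    set v : Int := if p.length = 0 then (32 : Int) else pvArr.getD (p.length - 1) 0 - ordLast p with hv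
    by_cases hvr : 32 ≤ v ∧ v ≤ 126
    · rw [if_pos hvr, if_pos hvr]
      have := ih (p ++ [Char.ofNat v.toNat]) (by simp; omega)
      rw [this]
      have hol : ordLast (p ++ [Char.ofNat v.toNat]) = v := ordLast_append_code p v hvr.1 hvr.2
      rw [hol]
      have hlen1 : (p ++ [Char.ofNat v.toNat]).length = p.length + 1 := by simp
      rw [hlen1]
      rw [pvToChars_cons]
      simp
    · rw [if_neg hvr, if_neg hvr]
      simp [pvToChars]

-- ===== the finite core =====
-- the 36 sweeps reach exactly the greedy fixpoint, for every admissible last-character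
-- code and every reachable length.  The check is done on kernel-evaluation-friendly
-- Nat mirrors of pvOuter/pvGreedy (binary-tree table lookup, forced sharing, a Nat
-- encoding of the code lists), which are proved equal to the Int versions below.

-- pvArr as a binary decision tree (same values; fast to evaluate in the kernel)
def pvArrN (n : Nat) : Nat :=
  if n < 19 then
    (if n < 9 then
      (if n < 4 then (if n < 2 then (if n = 0 then 156 else 150) else (if n = 2 then 189 else 175))
       else (if n < 6 then (if n = 4 then 147 else 195) else (if n = 6 then 148 else if n = 7 then 96 else 162)))
     else
      (if n < 14 then (if n < 11 then (if n = 9 then 209 else 194) else (if n = 11 then 207 else if n = 12 then 156 else 163))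
       else (if n < 16 then (if n = 14 then 166 else 104) else (if n = 16 then 148 else if n = 17 then 193 else 215))))
  else
    (if n < 28 then
      (if n < 23 then (if n < 21 then (if n = 19 then 172 else 150) else (if n = 21 then 147 else 147))
       else (if n < 25 then (if n = 23 then 214 else 168) else (if n = 25 then 159 else if n = 26 then 210 else 148)))
     else
      (if n < 33 then (if n < 30 then (if n = 28 then 167 else 214) else (if n = 30 then 143 else if n = 31 then 160 else 163))
       else (if n < 35 then (if n = 33 then 161 else 163) else (if n = 35 then 86 else if n = 36 then 158 else 0))))

theorem arrN_eq (n : Nat) : (pvArrN n : Int) = pvArr.getD n 0 := by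
  by_cases h : n < 37
  · interval_cases n <;> rfl
  · rw [List.getD_eq_default _ _ (by rw [pvArr_length]; omega)]
    unfold pvArrN
    split_ifs <;> omega

-- one inner sweep together with its end state, over Nat codes
def pvStepF : Nat → Nat → Nat → Nat → List Nat × Nat × Nat
  | 0, _, c, L => ([], c, L)
  | f + 1, j, c, L =>
    if L < 38 then
      if j ≤ 126 then
        if L = 0 then
          match pvStepF f (j + 1) j 1 with
          | (r, e) => (j :: r, e)
        else
          match pvArrN (L - 1) - c with
          | 0 => ([], c, L)
          | w + 1 =>
            if j ≤ w + 1 then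
              if w + 1 ≤ 126 then
                match pvStepF f (w + 2) (w + 1) (L + 1) with
                | (r, e) => ((w + 1) :: r, e)
              else ([], c, L)
            else ([], c, L)
      else ([], c, L)
    else ([], c, L)

def pvOuterFa : Nat → Nat → Nat → List Nat
  | 0, _, _ => []
  | n + 1, c, L =>
    match pvStepF 95 32 c L with
    | (r, c', L') =>
      match c', L' with   -- the four-way match forces c' and L' to literals (evaluation sharing)
      | 0, 0 => r ++ pvOuterFa n 0 0
      | 0, lk + 1 => r ++ pvOuterFa n 0 (lk + 1)
      | ck + 1, 0 => r ++ pvOuterFa n (ck + 1) 0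
      | ck + 1, lk + 1 => r ++ pvOuterFa n (ck + 1) (lk + 1)

def pvGreedyFa : Nat → Nat → Nat → List Nat
  | 0, _, _ => []
  | f + 1, c, L =>
    if L < 38 then
      match (if L = 0 then 32 else pvArrN (L - 1) - c) with
      | 0 => []
      | w + 1 => if 32 ≤ w + 1 then (if w + 1 ≤ 126 then (w + 1) :: pvGreedyFa f (w + 1) (L + 1) else []) else []
    else []

def pvEnc : List Nat → Nat
  | [] => 0
  | v :: r => pvEnc r * 128 + (v + 1)

def pvCodeAt (i : Nat) : Nat :=
  if i < 3 then (if i = 0 then 9 else if i = 1 then 10 else 13) else 29 + i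

def pvChkL : Nat → Nat → Bool
  | _, 0 => true
  | cc, k + 1 =>
    (pvEnc (pvOuterFa 36 cc k.succ) == pvEnc (pvGreedyFa 38 cc k.succ)) && pvChkL cc k

def pvChkC : Nat → Bool
  | 0 => true
  | i + 1 => pvChkL (pvCodeAt i) 37 && pvChkC i

set_option maxHeartbeats 400000000 in
set_option maxRecDepth 8000 in
theorem pvChk_dec : pvChkC 98 = true := by decide

theorem pvChk0_dec : (pvEnc (pvOuterFa 36 0 0) == pvEnc (pvGreedyFa 38 0 0)) = true := by decide

-- ----- bridging the fast Nat mirrors to the Int versions -----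

theorem pvStepF_zero (j c L : Nat) : pvStepF 0 j c L = ([], c, L) := rfl

theorem pvStepF_succ_stop (f j c L : Nat) (h : ¬(L < 38 ∧ j ≤ 126)) :
    pvStepF (f + 1) j c L = ([], c, L) := by
  by_cases h1 : L < 38
  · simp only [pvStepF]
    rw [if_pos h1, if_neg (by tauto)]
  · simp only [pvStepF]
    rw [if_neg h1]

theorem pvStepF_succ_zeroL (f j c : Nat) (h : j ≤ 126) :
    pvStepF (f + 1) j c 0 = (j :: (pvStepF f (j + 1) j 1).1, (pvStepF f (j + 1) j 1).2) := by
  simp [pvStepF, h]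

theorem pvStepF_succ_end0 (f j c L : Nat) (h1 : L < 38) (hj : j ≤ 126) (h0 : L ≠ 0)
    (hw : pvArrN (L - 1) - c = 0) : pvStepF (f + 1) j c L = ([], c, L) := by
  simp only [pvStepF, hw]
  rw [if_pos h1, if_pos hj, if_neg h0]

theorem pvStepF_succ_endw (f j c L w : Nat) (h1 : L < 38) (hj : j ≤ 126) (h0 : L ≠ 0)
    (hw : pvArrN (L - 1) - c = w + 1) (h : ¬(j ≤ w + 1) ∨ ¬(w + 1 ≤ 126)) :
    pvStepF (f + 1) j c L = ([], c, L) := by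
  simp only [pvStepF, hw]
  rw [if_pos h1, if_pos hj, if_neg h0]
  rcases h with h | h
  · rw [if_neg h]
  · by_cases hj2 : j ≤ w + 1
    · rw [if_pos hj2, if_neg h]
    · rw [if_neg hj2]

theorem pvStepF_succ_app (f j c L w : Nat) (h1 : L < 38) (hj : j ≤ 126) (h0 : L ≠ 0)
    (hw : pvArrN (L - 1) - c = w + 1) (h2 : j ≤ w + 1) (h3 : w + 1 ≤ 126) :
    pvStepF (f + 1) j c L
      = ((w + 1) :: (pvStepF f (w + 2) (w + 1) (L + 1)).1, (pvStepF f (w + 2) (w + 1) (L + 1)).2) := by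
  simp only [pvStepF, hw]
  rw [if_pos h1, if_pos hj, if_neg h0, if_pos h2, if_pos h3]

theorem step_eq (f : Nat) : ∀ (j cn L : Nat), 32 ≤ j →
    pvRun f j (cn : Int) L = (pvStepF f j cn L).1.map (fun (w : Nat) => (w : Int)) ∧
    ((pvStepF f j cn L).2.1 : Int) = ((pvRun f j (cn : Int) L).getLastD (cn : Int)) ∧
    (pvStepF f j cn L).2.2 = L + (pvRun f j (cn : Int) L).length := by
  induction f with
  | zero =>
    intro j cn L hj
    rw [pvRun_zero, pvStepF_zero]
    exact ⟨rfl, rfl, by simp⟩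
  | succ f ih =>
    intro j cn L hj
    by_cases hcond : L < 38 ∧ j ≤ 126
    case neg =>
      rw [pvRun_succ_stop _ _ _ _ hcond, pvStepF_succ_stop f j cn L hcond]
      exact ⟨rfl, rfl, by simp⟩
    case pos =>
    obtain ⟨hL, hjle⟩ := hcond
    by_cases hL0 : L = 0
    · subst hL0
      rw [pvRun_succ_zero f j _ hjle, pvStepF_succ_zeroL f j cn hjle]
      obtain ⟨ih1, ih2, ih3⟩ := ih (j + 1) j 1 (by omega)
      refine ⟨?_, ?_, ?_⟩
      · show ((j : Nat) : Int) :: pvRun f (j + 1) ((j : Nat) : Int) 1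
            = ((j : Nat) : Int) :: (pvStepF f (j + 1) j 1).1.map (fun (w : Nat) => (w : Int))
        rw [ih1]
      · show ((pvStepF f (j + 1) j 1).2.1 : Int)
            = (((j : Nat) : Int) :: pvRun f (j + 1) ((j : Nat) : Int) 1).getLastD ((cn : Nat) : Int)
        rw [List.getLastD_cons]
        exact ih2
      · show (pvStepF f (j + 1) j 1).2.2
            = 0 + (((j : Nat) : Int) :: pvRun f (j + 1) ((j : Nat) : Int) 1).length
        rw [List.length_cons]
        omega
    · have harr := arrN_eq (L - 1)
      rcases hnv : pvArrN (L - 1) - cn with _ | w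
      · have hle : pvArr.getD (L - 1) 0 - (cn : Int) ≤ 0 := by rw [← harr]; omega
        rw [pvRun_succ_end f j _ L hL hjle hL0 (by omega),
            pvStepF_succ_end0 f j cn L hL hjle hL0 hnv]
        exact ⟨rfl, rfl, by simp⟩
      · have hveq : pvArr.getD (L - 1) 0 - (cn : Int) = ((w + 1 : Nat) : Int) := by
          rw [← harr]; omega
        by_cases hjw : j ≤ w + 1
        case neg =>
          rw [pvRun_succ_end f j _ L hL hjle hL0 (by rw [hveq]; push_cast; omega),
              pvStepF_succ_endw f j cn L w hL hjle hL0 hnv (Or.inl hjw)]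
          exact ⟨rfl, rfl, by simp⟩
        case pos =>
        by_cases hw126 : w + 1 ≤ 126
        case neg =>
          rw [pvRun_succ_end f j _ L hL hjle hL0 (by rw [hveq]; push_cast; omega),
              pvStepF_succ_endw f j cn L w hL hjle hL0 hnv (Or.inr hw126)]
          exact ⟨rfl, rfl, by simp⟩
        case pos =>
          have h2i : (j : Int) ≤ pvArr.getD (L - 1) 0 - (cn : Int) := by
            rw [hveq]; push_cast; omega
          have h3i : pvArr.getD (L - 1) 0 - (cn : Int) ≤ 126 := by
            rw [hveq]; push_cast; omega
          rw [pvRun_succ_app f j _ L hL hjle hL0 h2i h3i,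
              pvStepF_succ_app f j cn L w hL hjle hL0 hnv hjw hw126]
          obtain ⟨ih1, ih2, ih3⟩ := ih (w + 2) (w + 1) (L + 1) (by omega)
          have htn : (pvArr.getD (L - 1) 0 - (cn : Int)).toNat + 1 = w + 2 := by
            rw [hveq]; omega
          refine ⟨?_, ?_, ?_⟩
          · rw [List.map_cons, htn, hveq, ih1]
          · rw [List.getLastD_cons, htn, hveq, ih2]
          · rw [List.length_cons, htn, hveq, ih3]
            omega

theorem outerFa_unfold (n : Nat) (c L : Nat) :
    pvOuterFa (n + 1) c L
      = (pvStepF 95 32 c L).1 ++ pvOuterFa n (pvStepF 95 32 c L).2.1 (pvStepF 95 32 c L).2.2 := by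
  rcases hs : pvStepF 95 32 c L with ⟨r, c', L'⟩
  rw [pvOuterFa, hs]
  cases c' <;> cases L' <;> rfl

theorem getLastD_map_natCast (l : List Nat) (d : Nat) :
    (l.map (fun (w : Nat) => (w : Int))).getLastD (d : Int) = ((l.getLastD d : Nat) : Int) := by
  induction l generalizing d with
  | nil => rfl
  | cons x r ih => rw [List.map_cons, List.getLastD_cons, List.getLastD_cons, ih x]

theorem outer_eq (n : Nat) : ∀ (cn L : Nat),
    pvOuter n (cn : Int) L = (pvOuterFa n cn L).map (fun (w : Nat) => (w : Int)) := by
  induction n with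
  | zero => intro cn L; rfl
  | succ n ih =>
    intro cn L
    obtain ⟨h1, h2, h3⟩ := step_eq 95 32 cn L (by omega)
    have hcast : (pvStepF 95 32 cn L).1.getLastD cn = (pvStepF 95 32 cn L).2.1 := by
      have he := h2
      rw [h1, getLastD_map_natCast] at he
      exact_mod_cast he.symm
    have h3' : (pvStepF 95 32 cn L).2.2 = L + (pvStepF 95 32 cn L).1.length := by
      rw [h3, h1, List.length_map]
    simp only [pvOuter]
    rw [h1, getLastD_map_natCast, hcast, List.length_map, ← h3']
    rw [ih ((pvStepF 95 32 cn L).2.1) ((pvStepF 95 32 cn L).2.2)]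
    rw [outerFa_unfold, List.map_append]

theorem pvGreedyFa_succ_stop (f c L : Nat) (h : ¬L < 38) : pvGreedyFa (f + 1) c L = [] := by
  simp only [pvGreedyFa]
  rw [if_neg h]

theorem pvGreedyFa_succ_zero (f c : Nat) : pvGreedyFa (f + 1) c 0 = 32 :: pvGreedyFa f 32 1 := rfl

theorem pvGreedyFa_succ_w (f c L w : Nat) (h1 : L < 38) (h0 : L ≠ 0) (hw : pvArrN (L - 1) - c = w + 1) :
    pvGreedyFa (f + 1) c L
      = if 32 ≤ w + 1 then (if w + 1 ≤ 126 then (w + 1) :: pvGreedyFa f (w + 1) (L + 1) else []) else [] := by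
  simp only [pvGreedyFa, if_neg h0, hw]
  rw [if_pos h1]

theorem pvGreedyFa_succ_w0 (f c L : Nat) (h1 : L < 38) (h0 : L ≠ 0) (hw : pvArrN (L - 1) - c = 0) :
    pvGreedyFa (f + 1) c L = [] := by
  simp only [pvGreedyFa, if_neg h0, hw]
  rw [if_pos h1]

theorem pvGreedy_succ_zero (f : Nat) (c : Int) : pvGreedy (f + 1) c 0 = 32 :: pvGreedy f 32 1 := rfl

theorem greedy_eq (f : Nat) : ∀ (cn L : Nat),
    pvGreedy f (cn : Int) L = (pvGreedyFa f cn L).map (fun (w : Nat) => (w : Int)) := by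
  induction f with
  | zero => intro cn L; rfl
  | succ f ih =>
    intro cn L
    by_cases hL : L < 38
    case neg =>
      rw [pvGreedy, if_neg hL, pvGreedyFa_succ_stop f cn L hL]
      rfl
    case pos =>
    by_cases hL0 : L = 0
    · subst hL0
      rw [pvGreedy_succ_zero, pvGreedyFa_succ_zero, List.map_cons]
      have h0 := ih 32 1
      norm_num at h0 ⊢
      exact h0
    · have harr := arrN_eq (L - 1)
      rw [pvGreedy, if_pos hL, if_neg hL0]
      rcases hnv : pvArrN (L - 1) - cn with _ | w
      · have hle : pvArr.getD (L - 1) 0 - (cn : Int) ≤ 0 := by rw [← harr]; omega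
        rw [if_neg (by omega), pvGreedyFa_succ_w0 f cn L hL hL0 hnv]
        rfl
      · have hveq : pvArr.getD (L - 1) 0 - (cn : Int) = ((w + 1 : Nat) : Int) := by
          rw [← harr]; omega
        rw [hveq, pvGreedyFa_succ_w f cn L w hL hL0 hnv]
        by_cases h32 : 32 ≤ w + 1
        case neg =>
          rw [if_neg (by push_cast; omega), if_neg h32]
          rfl
        case pos =>
        by_cases h126 : w + 1 ≤ 126
        case neg =>
          rw [if_neg (by push_cast; omega), if_pos h32, if_neg h126]
          rfl
        case pos =>
          rw [if_pos (by push_cast; omega), if_pos h32, if_pos h126]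
          rw [List.map_cons, ih (w + 1) (L + 1)]

-- the encoding is injective on lists of codes < 127
theorem enc_inj : ∀ (l1 l2 : List Nat), (∀ x ∈ l1, x ≤ 126) → (∀ x ∈ l2, x ≤ 126) →
    pvEnc l1 = pvEnc l2 → l1 = l2 := by
  intro l1
  induction l1 with
  | nil =>
    intro l2 _ hb2 he
    cases l2 with
    | nil => rfl
    | cons y r => exfalso; rw [pvEnc, pvEnc] at he; omega
  | cons x r1 ih =>
    intro l2 hb1 hb2 he
    cases l2 with
    | nil => exfalso; rw [pvEnc, pvEnc] at he; omega
    | cons y r2 =>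
      rw [pvEnc, pvEnc] at he
      have hx : x ≤ 126 := hb1 x (by simp)
      have hy : y ≤ 126 := hb2 y (by simp)
      have hxy : x = y ∧ pvEnc r1 = pvEnc r2 := by omega
      rw [hxy.1, ih r2 (fun z hz => hb1 z (by simp [hz])) (fun z hz => hb2 z (by simp [hz])) hxy.2]

-- element bounds (transferred to the mirrors through the maps)
theorem outer_bounds (n : Nat) : ∀ (c : Int) (L : Nat), ∀ x ∈ pvOuter n c L, 32 ≤ x ∧ x ≤ 126 := by
  induction n with
  | zero => intro c L x hx; simp [pvOuter] at hx
  | succ n ih =>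
    intro c L x hx
    rw [pvOuter] at hx
    rcases List.mem_append.1 hx with hx | hx
    · exact run_bounds 95 32 c L (by omega) x hx
    · exact ih _ _ x hx

theorem greedy_bounds (f : Nat) : ∀ (c : Int) (L : Nat), ∀ x ∈ pvGreedy f c L, 32 ≤ x ∧ x ≤ 126 := by
  induction f with
  | zero => intro c L x hx; simp [pvGreedy] at hx
  | succ f ih =>
    intro c L x hx
    rw [pvGreedy] at hx
    by_cases hL : L < 38
    · rw [if_pos hL] at hx
      by_cases hvr : 32 ≤ (if L = 0 then (32 : Int) else pvArr.getD (L - 1) 0 - c) ∧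
          (if L = 0 then (32 : Int) else pvArr.getD (L - 1) 0 - c) ≤ 126
      · rw [if_pos hvr] at hx
        rcases List.mem_cons.1 hx with rfl | hx
        · exact hvr
        · exact ih _ _ x hx
      · rw [if_neg hvr] at hx; simp at hx
    · rw [if_neg hL] at hx; simp at hx

theorem natcast_bound_of_mem {l : List Nat} {w : Nat}
    (hb : ∀ x ∈ l.map (fun (w : Nat) => (w : Int)), 32 ≤ x ∧ x ≤ 126) (hw : w ∈ l) : w ≤ 126 := by
  have := hb (w : Int) (List.mem_map.2 ⟨w, hw, rfl⟩)
  omega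

-- per-case equality of the mirrors, extracted from the Bool check
theorem chkL_extract : ∀ (cc m : Nat), pvChkL cc m = true → ∀ k < m,
    (pvEnc (pvOuterFa 36 cc (k + 1)) == pvEnc (pvGreedyFa 38 cc (k + 1))) = true := by
  intro cc m
  induction m with
  | zero => intro _ k hk; omega
  | succ m ih =>
    intro h k hk
    rw [pvChkL, Bool.and_eq_true] at h
    by_cases hkm : k = m
    · subst hkm; exact h.1
    · exact ih h.2 k (by omega)

theorem chkC_extract : ∀ (m : Nat), pvChkC m = true → ∀ i < m, pvChkL (pvCodeAt i) 37 = true := by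
  intro m
  induction m with
  | zero => intro _ i hi; omega
  | succ m ih =>
    intro h i hi
    rw [pvChkC, Bool.and_eq_true] at h
    by_cases him : i = m
    · subst him; exact h.1
    · exact ih h.2 i (by omega)

-- assembling: pvOuter 36 = pvGreedy 38 for one mirrored Nat case
theorem pvF_case (cn L : Nat) (henc : (pvEnc (pvOuterFa 36 cn L) == pvEnc (pvGreedyFa 38 cn L)) = true) :
    pvOuter 36 (cn : Int) L = pvGreedy 38 (cn : Int) L := by
  rw [outer_eq, greedy_eq]
  congr 1
  refine enc_inj _ _ ?_ ?_ (by simpa using henc)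
  · intro w hw
    exact natcast_bound_of_mem (l := pvOuterFa 36 cn L)
      (hb := by rw [← outer_eq]; exact outer_bounds 36 ((cn : Nat) : Int) L) hw
  · intro w hw
    exact natcast_bound_of_mem (l := pvGreedyFa 38 cn L)
      (hb := by rw [← greedy_eq]; exact greedy_bounds 38 ((cn : Nat) : Int) L) hw

theorem pvF0 : pvOuter 36 (0 : Int) 0 = pvGreedy 38 (0 : Int) 0 := by
  have := pvF_case 0 0 pvChk0_dec
  simpa using this

theorem pvOuter_long (n : Nat) (c : Int) (L : Nat) (h : 38 ≤ L) : pvOuter n c L = [] := by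
  induction n generalizing c L with
  | zero => rfl
  | succ m ih =>
    have hr : pvRun 95 32 c L = [] := run_long 95 32 c L h
    simp [pvOuter, hr, ih _ _ h]

theorem pvGreedy_long (f : Nat) (c : Int) (L : Nat) (h : 38 ≤ L) : pvGreedy f c L = [] := by
  cases f <;> simp [pvGreedy, show ¬(L < 38) by omega]

theorem pvF (c : Int) (hc : c = 9 ∨ c = 10 ∨ c = 13 ∨ (32 ≤ c ∧ c ≤ 126)) (L : Nat)
    (h1 : 1 ≤ L) (h2 : L ≤ 37) : pvOuter 36 c L = pvGreedy 38 c L := by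
  have hidx : ∃ i : Nat, i < 98 ∧ ((pvCodeAt i : Nat) : Int) = c := by
    rcases hc with h | h | h | h
    · exact ⟨0, by omega, by rw [h]; rfl⟩
    · exact ⟨1, by omega, by rw [h]; rfl⟩
    · exact ⟨2, by omega, by rw [h]; rfl⟩
    · refine ⟨c.toNat - 29, by omega, ?_⟩
      rw [pvCodeAt, if_neg (by omega)]
      omega
  obtain ⟨i, hi, hci⟩ := hidx
  have hLk := chkC_extract 98 pvChk_dec i hi
  have henc := chkL_extract (pvCodeAt i) 37 hLk (L - 1) (by omega)
  have hL1 : L - 1 + 1 = L := by omega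
  rw [hL1] at henc
  rw [← hci]
  exact pvF_case (pvCodeAt i) L henc


-- ===== identity cases =====

theorem fold_id {p : List Char} (hid : ∀ i : Int, pvInnerBody p i = p) (l : List Int) :
    l.foldl pvInnerBody p = p := by
  induction l with
  | nil => rfl
  | cons x t ih => rw [List.foldl_cons, hid, ih]

theorem body_id_long (p : List Char) (h : 38 ≤ p.length) (i : Int) : pvInnerBody p i = p := by
  rw [pvInnerBody]
  simp only [List.length_append, List.length_cons, List.length_nil]
  rw [if_neg (by push_cast; omega)]

theorem body_id_bad (p : List Char) (hg : pvGoodB p pvArr = false) (i : Int) : pvInnerBody p i = p := by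
  rw [pvInnerBody]
  split_ifs with hlen hchk
  · exfalso
    have hlen' : p.length ≤ 37 := by
      simp at hlen
      omega
    rw [check_eq _ (by simp; omega)] at hchk
    have hgt := (good_append p (Char.ofNat i.toNat) pvArr (by rw [pvArr_length]; omega)).1 hchk
    rw [hgt.1] at hg
    simp at hg
  · rfl
  · rfl

theorem outer_id {p : List Char} (hid : ∀ i : Int, pvInnerBody p i = p) (l : List Int) :
    l.foldl (fun password _ => pvPass password) p = p := by
  induction l with
  | nil => rfl
  | cons x t ih => rw [List.foldl_cons, pvPass, fold_id hid, ih]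

-- ===== assembling the verdict =====

theorem length_pyRange36 : (PySem.List.pyRange 0 36 1).length = 36 := by decide

theorem main_core (l : List Char) (hdc : l.all pvDomChar = true)
    (hguard : ((l.length : Int) < 39) ∧ pvGoodB l pvArr = true) :
    (PySem.List.pyRange 0 36 1).foldl (fun password _ => pvPass password) l = pvGrow l := by
  have hlen38 : l.length ≤ 38 := by omega
  rw [foldl_const_iterate pvPass _ l, length_pyRange36]
  rw [(iter_eq 36 l hguard.2).1, grow_aux 38 l (by omega)]
  suffices h : pvOuter 36 (ordLast l) l.length = pvGreedy 38 (ordLast l) l.length by rw [h]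
  by_cases hL38 : l.length = 38
  · rw [hL38, pvOuter_long _ _ _ (by omega), pvGreedy_long _ _ _ (by omega)]
  by_cases hnil : l = []
  · subst hnil
    simpa [ordLast] using pvF0
  · have hL1 : 1 ≤ l.length := by
      cases l with
      | nil => exact absurd rfl hnil
      | cons a t => simp
    obtain ⟨ch, hch⟩ : ∃ ch, l.getLast? = some ch := by
      cases hq : l.getLast? with
      | none => rw [List.getLast?_eq_none_iff] at hq; exact absurd hq hnil
      | some ch => exact ⟨ch, rfl⟩
    have hmem : ch ∈ l := List.mem_of_getLast? hch
    have hdc2 := List.all_eq_true.1 hdc ch hmem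
    have holv : ordLast l = (ch.toNat : Int) := by rw [ordLast, hch]
    have hcd : ordLast l = 9 ∨ ordLast l = 10 ∨ ordLast l = 13 ∨ (32 ≤ ordLast l ∧ ordLast l ≤ 126) := by
      simp only [pvDomChar, Bool.or_eq_true, Bool.and_eq_true, beq_iff_eq, decide_eq_true_eq] at hdc2
      rw [holv]
      rcases hdc2 with ((⟨hd1, hd2⟩ | hd) | hd) | hd
      · right; right; right; omega
      · left; omega
      · right; left; omega
      · right; right; left; omega
    exact pvF (ordLast l) hcd l.length hL1 (by omega)

theorem main_eq (start : String) (hdom : Dom_bruteforce_password start) :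
    bruteforce_password start = bruteforce_password_alt start := by
  unfold bruteforce_password bruteforce_password_alt
  show String.ofList ((PySem.List.pyRange 0 36 1).foldl (fun password _ => pvPass password) start.toList)
      = if ((start.toList.length : Int) < 39) ∧ pvGoodB start.toList pvArr
        then String.ofList (pvGrow start.toList) else start
  by_cases hguard : ((start.toList.length : Int) < 39) ∧ pvGoodB start.toList pvArr = true
  · rw [if_pos (by exact_mod_cast hguard)]
    rw [main_core start.toList hdom hguard]
  · rw [if_neg (fun hcon => hguard ⟨hcon.1, by exact_mod_cast hcon.2⟩)]
    by_cases hg : pvGoodB start.toList pvArr = true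
    · have hlong : 38 ≤ start.toList.length := by
        by_contra hcon
        exact hguard ⟨by push_cast; omega, hg⟩
      rw [outer_id (body_id_long start.toList hlong), String.ofList_toList]
    · have hgf : pvGoodB start.toList pvArr = false := by
        cases h : pvGoodB start.toList pvArr with
        | true => exact absurd h hg
        | false => rfl
      rw [outer_id (body_id_bad start.toList hgf), String.ofList_toList]

-- ===== VERDICT (by name: the statement is the Claim_ definition above) =====
theorem bruteforce_password_spec : Claim_equal_bruteforce_password := by
  intro start hdom
  unfold Spec_bruteforce_password
  exact main_eq start hdom
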